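-- pv_equiv track=rewrite | github.com/hulsed/FFERMAT | ChangeFunctions.py | enumerateStates
-- ===== SOURCE A (Python) =====
-- def enumerateStates(conditions, modes):
--     conds=len(conditions)
--     condlist=[]
--     modelist=[]
--
--     for j in range(conds):
--         for k in range(modes):
--             condlist=condlist+[conditions[j]]
--             modelist=modelist+[str(k+1)]
--
--     return condlist, modelist
-- ===== SOURCE B (Python) =====
-- def enumerateStates(conditions, modes):
--     modepattern = [str(k + 1) for k in range(modes)]
--     condlist = []
--     for c in conditions:
--         condlist += [c] * modes
--     modelist = modepattern * len(conditions)
--     return condlist, modelist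
-- ===== Notes on version B (the rewrite author's own statement) =====
-- stated objective: faster
-- what changed: Replaces the nested index loops that rebuild both lists by quadratic concatenation with block repetition: the mode pattern is computed once and tiled, and each condition is extended as a block.
import Mathlib
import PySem

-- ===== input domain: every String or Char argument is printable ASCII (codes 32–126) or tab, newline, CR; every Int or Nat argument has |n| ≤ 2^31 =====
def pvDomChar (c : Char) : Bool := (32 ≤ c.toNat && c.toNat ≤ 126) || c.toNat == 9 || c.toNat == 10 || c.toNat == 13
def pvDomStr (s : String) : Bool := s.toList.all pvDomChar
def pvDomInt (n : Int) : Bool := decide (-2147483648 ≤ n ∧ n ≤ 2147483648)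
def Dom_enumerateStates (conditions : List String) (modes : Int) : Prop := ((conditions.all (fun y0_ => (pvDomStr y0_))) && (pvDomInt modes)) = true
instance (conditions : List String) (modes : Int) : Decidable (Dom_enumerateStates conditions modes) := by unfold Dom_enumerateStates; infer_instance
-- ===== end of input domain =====

-- B replaces A's nested index loops (quadratic list concatenation) by block repetition: faster.

-- ===== PORT A =====
def enumerateStates (conditions : List String) (modes : Int) : List String × List String :=
  let conds : Int := conditions.length
  (PySem.List.pyRange 0 conds 1).foldl (fun st j =>
    (PySem.List.pyRange 0 modes 1).foldl (fun st k =>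
      (st.1 ++ [PySem.List.pyGetD conditions j ""], st.2 ++ [PySem.Int.toStr (k + 1)])) st)
    ([], [])

-- ===== PORT B =====
def enumerateStates_alt (conditions : List String) (modes : Int) : List String × List String :=
  let modepattern := (PySem.List.pyRange 0 modes 1).map (fun k => PySem.Int.toStr (k + 1))
  let condlist := conditions.foldl (fun acc c => acc ++ List.replicate modes.toNat c) []
  let modelist := (List.replicate conditions.length modepattern).flatten
  (condlist, modelist)

-- ===== PRECONDITION & SPEC =====
def Spec_enumerateStates (conditions : List String) (modes : Int) (out : List String × List String) : Prop := out = enumerateStates_alt conditions modes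
instance (conditions : List String) (modes : Int) (out : List String × List String) : Decidable (Spec_enumerateStates conditions modes out) := by unfold Spec_enumerateStates; infer_instance

-- ===== CLAIM (what is proved, stated in full; the proofs are below) =====
def Claim_equal_enumerateStates : Prop := ∀ (conditions : List String) (modes : Int), Dom_enumerateStates conditions modes → Spec_enumerateStates conditions modes (enumerateStates conditions modes)

-- ===== LEMMAS AND PROOFS =====

-- A's inner loop appends one block of conditions[j] copies and one copy of the mode pattern.
theorem pv_inner (l : List Int) (x : String) (st : List String × List String) :
    l.foldl (fun st k => (st.1 ++ [x], st.2 ++ [PySem.Int.toStr (k + 1)])) st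
      = (st.1 ++ List.replicate l.length x, st.2 ++ l.map (fun k => PySem.Int.toStr (k + 1))) := by
  induction l generalizing st with
  | nil => simp
  | cons h t ih => simp [List.foldl_cons, ih, List.replicate_succ]

-- A's outer loop, reformulated over the list itself, produces B's two lists.
theorem pv_outer (m : Nat) (pat : List String) (cs : List String) (st : List String × List String) :
    cs.foldl (fun st c => (st.1 ++ List.replicate m c, st.2 ++ pat)) st
      = (st.1 ++ cs.flatMap (List.replicate m),
         st.2 ++ (List.replicate cs.length pat).flatten) := by
  induction cs generalizing st with
  | nil => simp
  | cons h t ih => simp [List.foldl_cons, ih, List.replicate_succ]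

-- ===== VERDICT (by name: the statement is the Claim_ definition above) =====
theorem enumerateStates_spec : Claim_equal_enumerateStates := by
  intro conditions modes _
  unfold Spec_enumerateStates enumerateStates enumerateStates_alt
  simp only
  rw [PySem.List.foldl_pyRange_zero_pyGetD' conditions ""
        (fun st c => (PySem.List.pyRange 0 modes 1).foldl
          (fun st k => (st.1 ++ [c], st.2 ++ [PySem.Int.toStr (k + 1)])) st) ([], [])]
  have hlen : (PySem.List.pyRange 0 modes 1).length = modes.toNat := by
    rw [PySem.List.length_pyRange_one]; omega
  calc conditions.foldl (fun st c => (PySem.List.pyRange 0 modes 1).foldl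
          (fun st k => (st.1 ++ [c], st.2 ++ [PySem.Int.toStr (k + 1)])) st) ([], [])
      = conditions.foldl (fun st c => (st.1 ++ List.replicate modes.toNat c,
          st.2 ++ (PySem.List.pyRange 0 modes 1).map (fun k => PySem.Int.toStr (k + 1)))) ([], []) := by
        apply PySem.List.foldl_congr_mem
        intro st c _
        rw [pv_inner, hlen]
    _ = _ := by rw [pv_outer, PySem.List.foldl_append_eq_flatMap]; simp
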